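-- pv_equiv track=rewrite | github.com/mg-2321/GuardRAG | corpus_generation/materialize_msmarco_main.py | _unicode_encode
-- ===== SOURCE A (Python) =====
-- _UNI_SUBST = {
--     'a': '\u0430', 'e': '\u0435', 'o': '\u043e',
--     'p': '\u0440', 'c': '\u0441', 'x': '\u0445', 'y': '\u0443',
-- }
--
-- def _unicode_encode(text: str, seed: int = 0) -> str:
--     out = []
--     count = seed
--     for ch in text:
--         sub = _UNI_SUBST.get(ch.lower())
--         if sub and count % 3 == 1:
--             out.append(sub if ch.islower() else sub.upper())
--         else:
--             out.append(ch)
--         if ch.isalpha():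
--             count += 1
--     return "".join(out)
-- ===== SOURCE B (Python) =====
-- _UNI_SUBST = {
--     'a': '\u0430', 'e': '\u0435', 'o': '\u043e',
--     'p': '\u0440', 'c': '\u0441', 'x': '\u0445', 'y': '\u0443',
-- }
--
-- def _unicode_encode(text: str, seed: int = 0) -> str:
--     # Every substitutable character is alphabetic, and the j-th alphabetic
--     # character (0-based) sees count seed + j; so instead of threading a
--     # counter through the whole string we list the alphabetic positions once
--     # and mutate the buffer only at every third of them, starting at the
--     # first alpha-rank j with (seed + j) % 3 == 1, i.e. j0 = (1 - seed) % 3.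
--     chars = list(text)
--     alpha_pos = [i for i, c in enumerate(text) if c.isalpha()]
--     for j in range((1 - seed) % 3, len(alpha_pos), 3):
--         i = alpha_pos[j]
--         ch = chars[i]
--         sub = _UNI_SUBST.get(ch.lower())
--         if sub:
--             chars[i] = sub if ch.islower() else sub.upper()
--     return "".join(chars)
-- ===== Notes on version B (the rewrite author's own statement) =====
-- stated objective: alternative
-- what changed: A threads a mutable alpha-counter through one fused pass over every character; B never counts during output: it collects the alphabetic positions once, computes the first hit rank (1-seed)%3 in closed form, and mutates the character buffer in place only at every third alphabetic position before joining.
import Mathlib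
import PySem

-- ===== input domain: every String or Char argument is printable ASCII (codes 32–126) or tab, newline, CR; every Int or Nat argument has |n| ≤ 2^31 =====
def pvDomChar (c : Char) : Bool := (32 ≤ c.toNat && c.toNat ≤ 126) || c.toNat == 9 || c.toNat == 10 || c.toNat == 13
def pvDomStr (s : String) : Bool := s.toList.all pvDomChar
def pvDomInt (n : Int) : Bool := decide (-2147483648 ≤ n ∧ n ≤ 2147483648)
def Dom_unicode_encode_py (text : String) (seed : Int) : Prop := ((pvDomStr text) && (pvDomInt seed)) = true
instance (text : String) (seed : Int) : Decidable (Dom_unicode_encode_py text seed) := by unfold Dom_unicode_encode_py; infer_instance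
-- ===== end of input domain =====

-- B drops A's per-character counter entirely: it lists the alphabetic positions once and
-- rewrites the buffer in place only at every third of them (stride-3 index loop); objective: alternative.

-- shared constant: the _UNI_SUBST dict (each value is a single Cyrillic char)
def pvUniSubst : PySem.Dict Char Char := PySem.Dict.ofList
  [('a', 'а'), ('e', 'е'), ('o', 'о'), ('p', 'р'), ('c', 'с'), ('x', 'х'), ('y', 'у')]

-- sub.upper() for these one-char Cyrillic values: exact, the uppercase is codepoint − 0x20
def pvUpperCyr (c : Char) : Char := Char.ofNat (c.toNat - 32)

-- ===== PORT A =====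
-- one step of A's loop body (state: output list so far, running count)
def pvStepA (st : List Char × Int) (ch : Char) : List Char × Int :=
  let sub := PySem.Dict.get? pvUniSubst (PySem.Chars.lowerChar ch)
  let out :=
    match sub with
    | some s =>
        if PySem.Int.mod st.2 3 == 1 then
          st.1 ++ [if PySem.Chars.islower ch then s else pvUpperCyr s]
        else st.1 ++ [ch]
    | none => st.1 ++ [ch]
  let count := if PySem.Chars.isalpha ch then st.2 + 1 else st.2
  (out, count)

-- literal transliteration of A's loop: state (out, count), same branch order
def unicode_encode_py (text : String) (seed : Int) : String :=
  let r := text.toList.foldl pvStepA ([], seed)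
  String.ofList r.1

-- ===== PORT B =====
-- one step of B's loop body: chars[i] is rewritten in place when its lowercase is in the dict
def pvStepB (cs : List Char) (i : Int) : List Char :=
  let ch := PySem.List.pyGetD cs i ' '
  match PySem.Dict.get? pvUniSubst (PySem.Chars.lowerChar ch) with
  | some s => PySem.List.pySetD cs i (if PySem.Chars.islower ch then s else pvUpperCyr s)
  | none => cs

-- transliteration of Source B: alphabetic positions once, then a stride-3 in-place rewrite loop
def unicode_encode_py_alt (text : String) (seed : Int) : String :=
  let chars := text.toList
  let alpha_pos : List Int :=
    ((PySem.List.enumerate chars 0).filter (fun p => PySem.Chars.isalpha p.2)).map (fun p => p.1)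
  let r := (PySem.List.pyRange (PySem.Int.mod (1 - seed) 3) (alpha_pos.length : Int) 3).foldl
      (fun cs j => pvStepB cs (PySem.List.pyGetD alpha_pos j (-1))) chars
  String.ofList r

-- ===== PRECONDITION & SPEC =====
def Spec_unicode_encode_py (text : String) (seed : Int) (out : String) : Prop := out = unicode_encode_py_alt text seed
instance (text : String) (seed : Int) (out : String) : Decidable (Spec_unicode_encode_py text seed out) := by unfold Spec_unicode_encode_py; infer_instance

-- ===== CLAIM (what is proved, stated in full; the proofs are below) =====
def Claim_equal_unicode_encode_py : Prop := ∀ (text : String) (seed : Int), Dom_unicode_encode_py text seed → Spec_unicode_encode_py text seed (unicode_encode_py text seed)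

-- ===== LEMMAS AND PROOFS =====

-- the per-character mapping A applies (character, exclusive alpha count before it)
def pvMapB (p : Char × Int) : Char :=
  match PySem.Dict.get? pvUniSubst (PySem.Chars.lowerChar p.1) with
  | some s =>
      if PySem.Int.mod p.2 3 == 1 then
        (if PySem.Chars.islower p.1 then s else pvUpperCyr s)
      else p.1
  | none => p.1

-- the unconditional substitute (what pvStepB writes when the dict hits)
def pvMapOne (c : Char) : Char :=
  match PySem.Dict.get? pvUniSubst (PySem.Chars.lowerChar c) with
  | some s => if PySem.Chars.islower c then s else pvUpperCyr s
  | none => c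

-- exclusive prefix counts of alphabetic characters
def pvCounts : List Char → Int → List Int
  | [], s => [s]
  | c :: cs, s => s :: pvCounts cs (s + (if PySem.Chars.isalpha c then 1 else 0))

-- number of alphabetic chars in a list
def pvCntA (xs : List Char) : Nat := xs.countP (fun c => PySem.Chars.isalpha c)

-- the alphabetic positions of cs, starting index s
def pvApos : List Char → Int → List Int
  | [], _ => []
  | c :: t, s => if PySem.Chars.isalpha c then s :: pvApos t (s + 1) else pvApos t (s + 1)

-- ---- A-side: the fold is the per-character map with exclusive counts ----

lemma pvLoop_eq (cs : List Char) : ∀ (out : List Char) (count : Int),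
    (cs.foldl pvStepA (out, count)).1 = out ++ (cs.zip (pvCounts cs count)).map pvMapB := by
  induction cs with
  | nil => intro out count; simp [pvCounts]
  | cons c cs ih =>
      intro out count
      simp only [List.foldl_cons, pvCounts, List.zip_cons_cons, List.map_cons]
      rw [show pvStepA (out, count) c =
        (out ++ [pvMapB (c, count)], count + (if PySem.Chars.isalpha c then 1 else 0)) from ?_]
      · rw [ih]; simp
      · simp only [pvStepA, pvMapB]
        cases PySem.Dict.get? pvUniSubst (PySem.Chars.lowerChar c) with
        | none => simp; split <;> simp
        | some s => simp; constructor <;> split <;> simp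

lemma pvCounts_length (cs : List Char) : ∀ s, (pvCounts cs s).length = cs.length + 1 := by
  induction cs with
  | nil => intro s; simp [pvCounts]
  | cons c t ih => intro s; simp [pvCounts, ih]

-- A's output, positionally
lemma pvA_getElem? (cs : List Char) : ∀ (seed : Int) (p : Nat), p < cs.length →
    ((cs.zip (pvCounts cs seed)).map pvMapB)[p]? =
      some (pvMapB (cs.getD p ' ', seed + (pvCntA (cs.take p) : Int))) := by
  induction cs with
  | nil => intro seed p hp; simp at hp
  | cons c t ih =>
      intro seed p hp
      rw [pvCounts]
      cases p with
      | zero => simp [pvCntA]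
      | succ p =>
          simp only [List.zip_cons_cons, List.map_cons, List.getElem?_cons_succ, List.take_succ_cons,
            List.getD_cons_succ]
          rw [ih _ p (by simpa using hp)]
          congr 2
          simp only [pvCntA, List.countP_cons]
          by_cases hc : PySem.Chars.isalpha c <;> simp [hc] <;> push_cast <;> ring

-- ---- dict key fact: a dict hit implies the character is alphabetic ----

lemma pvSub_some_isalpha (c s' : Char)
    (h : PySem.Dict.get? pvUniSubst (PySem.Chars.lowerChar c) = some s') :
    PySem.Chars.isalpha c = true := by
  have hmem : PySem.Chars.lowerChar c ∈ pvUniSubst.keys := by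
    by_contra hn
    rw [← PySem.Dict.get?_eq_none_iff_not_mem_keys] at hn
    simp [h] at hn
  by_cases hu : PySem.Chars.isupper c
  · simp [PySem.Chars.isalpha, hu]
  · have hc : PySem.Chars.lowerChar c = c := by simp [PySem.Chars.lowerChar, hu]
    rw [hc] at hmem
    have hk : pvUniSubst.keys = ['a', 'e', 'o', 'p', 'c', 'x', 'y'] := by decide
    rw [hk] at hmem
    fin_cases hmem <;> decide

-- ---- alpha positions ----

lemma pvApos_eq (cs : List Char) : ∀ s : Int,
    ((PySem.List.enumerate cs s).filter (fun p => PySem.Chars.isalpha p.2)).map (fun p => p.1)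
      = pvApos cs s := by
  induction cs with
  | nil => intro s; simp [pvApos, PySem.List.enumerate_nil]
  | cons c t ih =>
      intro s
      rw [PySem.List.enumerate_cons]
      by_cases hc : PySem.Chars.isalpha c <;> simp [pvApos, hc, List.filter_cons, ih (s + 1)]

lemma pvApos_ge (cs : List Char) : ∀ s : Int, ∀ i ∈ pvApos cs s, s ≤ i := by
  induction cs with
  | nil => intro s i hi; simp [pvApos] at hi
  | cons c t ih =>
      intro s i hi
      by_cases hc : PySem.Chars.isalpha c
      · rw [pvApos, if_pos hc] at hi
        rcases List.mem_cons.mp hi with rfl | hmem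
        · exact le_refl _
        · have := ih (s + 1) i hmem; omega
      · rw [pvApos, if_neg hc] at hi
        have := ih (s + 1) i hi; omega

lemma pvApos_pairwise (cs : List Char) : ∀ s, (pvApos cs s).Pairwise (· < ·) := by
  induction cs with
  | nil => intro s; simp [pvApos]
  | cons c t ih =>
      intro s
      by_cases hc : PySem.Chars.isalpha c
      · rw [pvApos, if_pos hc]
        exact List.Pairwise.cons (fun i hi => by have := pvApos_ge t (s + 1) i hi; omega) (ih (s + 1))
      · rw [pvApos, if_neg hc]; exact ih (s + 1)

lemma pvApos_get_spec (cs : List Char) : ∀ (s i : Int) (k : Nat),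
    (pvApos cs s)[k]? = some i →
    ∃ p : Nat, i = s + p ∧ p < cs.length ∧ PySem.Chars.isalpha (cs.getD p ' ') = true ∧
      pvCntA (cs.take p) = k := by
  induction cs with
  | nil => intro s i k h; simp [pvApos] at h
  | cons c t ih =>
      intro s i k h
      by_cases hc : PySem.Chars.isalpha c
      · rw [pvApos, if_pos hc] at h
        cases k with
        | zero =>
            refine ⟨0, by simpa using (Option.some.inj (by simpa using h)).symm, by simp,
              by simpa using hc, by simp [pvCntA]⟩
        | succ k =>
            obtain ⟨p, hi, hp, ha, hcnt⟩ := ih (s + 1) i k (by simpa using h)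
            refine ⟨p + 1, by push_cast at hi ⊢; omega, by simp only [List.length_cons]; omega,
              by simpa using ha, ?_⟩
            simp [pvCntA, List.countP_cons, hc] at hcnt ⊢; omega
      · rw [pvApos, if_neg hc] at h
        obtain ⟨p, hi, hp, ha, hcnt⟩ := ih (s + 1) i k h
        refine ⟨p + 1, by push_cast at hi ⊢; omega, by simp only [List.length_cons]; omega,
          by simpa using ha, ?_⟩
        simp [pvCntA, List.countP_cons, hc] at hcnt ⊢; omega

lemma pvApos_get_of (cs : List Char) : ∀ (s : Int) (p : Nat), p < cs.length →
    PySem.Chars.isalpha (cs.getD p ' ') = true →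
    (pvApos cs s)[pvCntA (cs.take p)]? = some (s + p) := by
  induction cs with
  | nil => intro s p hp _; simp at hp
  | cons c t ih =>
      intro s p hp ha
      cases p with
      | zero =>
          have hc : PySem.Chars.isalpha c = true := by simpa using ha
          rw [pvApos, if_pos hc]
          simp [pvCntA]
      | succ p =>
          have hp' : p < t.length := by simpa using hp
          have ha' : PySem.Chars.isalpha (t.getD p ' ') = true := by simpa using ha
          have := ih (s + 1) p hp' ha'
          by_cases hc : PySem.Chars.isalpha c
          · rw [pvApos, if_pos hc]
            have hcnt : pvCntA ((c :: t).take (p + 1)) = pvCntA (t.take p) + 1 := by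
              simp [pvCntA, List.countP_cons, hc]
            rw [hcnt]
            simpa [add_comm, add_left_comm, add_assoc] using this
          · rw [pvApos, if_neg hc]
            have hcnt : pvCntA ((c :: t).take (p + 1)) = pvCntA (t.take p) := by
              simp [pvCntA, List.countP_cons, hc]
            rw [hcnt]
            simpa [add_comm, add_left_comm, add_assoc] using this

-- ---- B-side: the stride fold, positionally ----

lemma pvStepB_length (cs : List Char) (i : Int) : (pvStepB cs i).length = cs.length := by
  unfold pvStepB
  rcases h : PySem.Dict.get? pvUniSubst (PySem.Chars.lowerChar (PySem.List.pyGetD cs i ' ')) with _ | s <;>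
    simp [h, PySem.List.length_pySetD]

lemma pvFold_length : ∀ (idxs : List Int) (buf : List Char),
    (idxs.foldl pvStepB buf).length = buf.length := by
  intro idxs
  induction idxs with
  | nil => intro buf; rfl
  | cons i rest ih => intro buf; rw [List.foldl_cons, ih, pvStepB_length]

-- one in-range step, read positionally
lemma pvStepB_getElem? (cs0 buf : List Char) (hlen : buf.length = cs0.length)
    (p0 : Nat) (hp0 : p0 < cs0.length) (hbuf0 : buf[p0]? = cs0[p0]?) (r : Nat) :
    (pvStepB buf (p0 : Int))[r]? = if r = p0 then (cs0[p0]?).map pvMapOne else buf[r]? := by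
  have hplt : p0 < buf.length := by omega
  have hbufval : buf[p0]'hplt = cs0[p0]'hp0 := by
    have hb := hbuf0
    rw [List.getElem?_eq_getElem hplt, List.getElem?_eq_getElem hp0] at hb
    exact Option.some.inj hb
  have hget : PySem.List.pyGetD buf (p0 : Int) ' ' = cs0[p0] := by
    rw [PySem.List.pyGetD_eq_getElem buf ' ' (by positivity) (by exact_mod_cast hplt)]
    simpa using hbufval
  unfold pvStepB
  rw [hget]
  rcases hsub : PySem.Dict.get? pvUniSubst (PySem.Chars.lowerChar cs0[p0]) with _ | s
  · simp only [hsub]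
    by_cases hr : r = p0
    · subst hr
      rw [hbuf0, List.getElem?_eq_getElem hp0, if_pos rfl]
      simp [pvMapOne, hsub]
    · rw [if_neg hr]
  · simp only [hsub, PySem.List.pySetD_natCast]
    rw [List.getElem?_set]
    by_cases hr : r = p0
    · subst hr
      rw [if_pos rfl, if_pos hplt, List.getElem?_eq_getElem hp0, if_pos rfl]
      simp [pvMapOne, hsub]
    · rw [if_neg (fun h => hr h.symm), if_neg hr]

-- folding distinct in-range indices, read positionally
lemma pvFold_getElem? (cs0 : List Char) : ∀ (idxs : List Int) (buf : List Char),
    buf.length = cs0.length →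
    (∀ i ∈ idxs, ∃ p : Nat, i = (p : Int) ∧ p < cs0.length ∧ buf[p]? = cs0[p]?) →
    idxs.Nodup →
    ∀ (q : Nat), q < cs0.length →
      (idxs.foldl pvStepB buf)[q]? =
        if (q : Int) ∈ idxs then (cs0[q]?).map pvMapOne else buf[q]? := by
  intro idxs
  induction idxs with
  | nil => intro buf _ _ _ q _; simp
  | cons i0 rest ih =>
      intro buf hlen hin hnd q hq
      obtain ⟨p0, rfl, hp0, hbuf0⟩ := hin i0 List.mem_cons_self
      have hstep := pvStepB_getElem? cs0 buf hlen p0 hp0 hbuf0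
      have hlen1 : (pvStepB buf (p0 : Int)).length = cs0.length := by
        rw [pvStepB_length]; exact hlen
      have hin1 : ∀ i ∈ rest, ∃ p : Nat, i = (p : Int) ∧ p < cs0.length ∧
          (pvStepB buf (p0 : Int))[p]? = cs0[p]? := by
        intro i hi
        obtain ⟨p, rfl, hp, hb⟩ := hin i (List.mem_cons_of_mem _ hi)
        refine ⟨p, rfl, hp, ?_⟩
        have hne : p ≠ p0 := by
          intro h; subst h
          exact (List.nodup_cons.mp hnd).1 hi
        rw [hstep p, if_neg hne]; exact hb
      rw [List.foldl_cons, ih (pvStepB buf (p0 : Int)) hlen1 hin1 (List.nodup_cons.mp hnd).2 q hq]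
      by_cases hqr : (q : Int) ∈ rest
      · rw [if_pos hqr, if_pos (List.mem_cons_of_mem _ hqr)]
      · rw [if_neg hqr, hstep q]
        by_cases hq0 : q = p0
        · subst hq0
          rw [if_pos rfl, if_pos (List.mem_cons_self)]
        · rw [if_neg hq0, if_neg ?_]
          intro h
          rcases List.mem_cons.mp h with heq | hmem
          · exact hq0 (by exact_mod_cast heq)
          · exact hqr hmem

-- ---- the two lists are equal ----

lemma pvLists_eq (cs : List Char) (seed : Int) :
    ((PySem.List.pyRange (PySem.Int.mod (1 - seed) 3)
        (((((PySem.List.enumerate cs 0).filter (fun p => PySem.Chars.isalpha p.2)).map (fun p => p.1)).length : Int)) 3).foldl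
      (fun b j => pvStepB b (PySem.List.pyGetD
        (((PySem.List.enumerate cs 0).filter (fun p => PySem.Chars.isalpha p.2)).map (fun p => p.1)) j (-1))) cs)
    = (cs.foldl pvStepA ([], seed)).1 := by
  rw [pvLoop_eq, List.nil_append, pvApos_eq]
  set A := pvApos cs 0 with hA
  set j0 := PySem.Int.mod (1 - seed) 3 with hj0
  set L := PySem.List.pyRange j0 (A.length : Int) 3 with hL
  have hj0emod : j0 = (1 - seed) % 3 := PySem.Int.mod_eq_emod_of_pos (by norm_num)
  have hj0nn : 0 ≤ j0 := by rw [hj0emod]; omega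
  have hmemL : ∀ j : Int, j ∈ L ↔ j0 ≤ j ∧ j < (A.length : Int) ∧ (3 : Int) ∣ j - j0 := by
    intro j; exact PySem.List.mem_pyRange_iff_of_pos (by norm_num) j
  -- turn the fold into a fold over the list of target positions
  rw [show (fun b j => pvStepB b (PySem.List.pyGetD A j (-1)))
        = (fun (b : List Char) j => pvStepB b ((fun j => PySem.List.pyGetD A j (-1)) j)) from rfl,
      ← List.foldl_map]
  set g : Int → Int := fun j => PySem.List.pyGetD A j (-1) with hg
  set idxs := L.map g with hidxs
  have hgj : ∀ j ∈ L, A[j.toNat]? = some (g j) := by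
    intro j hj
    have hb := (hmemL j).mp hj
    rw [hg]
    simp only []
    rw [PySem.List.pyGetD_eq_getElem A (-1) (by omega) (by omega),
      List.getElem?_eq_getElem (by omega)]
  -- membership characterization of idxs
  have hmemI : ∀ x : Int, x ∈ idxs ↔ ∃ p : Nat, x = (p : Int) ∧ p < cs.length ∧
      PySem.Chars.isalpha (cs.getD p ' ') = true ∧
      (seed + (pvCntA (cs.take p) : Int)) % 3 = 1 := by
    intro x
    constructor
    · intro hx
      obtain ⟨j, hjL, hjx⟩ := List.mem_map.mp hx
      have hb := (hmemL j).mp hjL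
      have hx' : A[j.toNat]? = some x := by
        rw [hgj j hjL, hjx]
      obtain ⟨p, hip, hp, ha, hcnt⟩ := pvApos_get_spec cs 0 x j.toNat hx'
      refine ⟨p, by omega, hp, ha, ?_⟩
      have : (j.toNat : Int) = j := by omega
      rw [hcnt, this] at *
      omega
    · rintro ⟨p, rfl, hp, ha, hmod⟩
      have hsome := pvApos_get_of cs 0 p hp ha
      set k := pvCntA (cs.take p) with hk
      have hklt : k < A.length := by
        have := List.getElem?_eq_some_iff.mp (by simpa using hsome)
        exact this.1
      refine List.mem_map.mpr ⟨(k : Int), ?_, ?_⟩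
      · rw [hmemL]
        refine ⟨by omega, by omega, by omega⟩
      · have hgk := hgj (k : Int) (by rw [hmemL]; exact ⟨by omega, by omega, by omega⟩)
        have hsome' : A[((k : Int)).toNat]? = some ((0 : Int) + p) := by simpa using hsome
        rw [hgk] at hsome'
        have := Option.some.inj hsome'
        omega
  -- idxs has no duplicates
  have hndL : L.Nodup := by
    rw [hL, PySem.List.pyRange_of_pos _ _ (by norm_num : (0 : Int) < 3)]
    exact (List.nodup_range).map (fun a b h => by omega)
  have hndI : idxs.Nodup := by
    refine hndL.map_on ?_
    intro j1 hj1 j2 hj2 heq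
    have hb1 := (hmemL j1).mp hj1
    have hb2 := (hmemL j2).mp hj2
    have e1 := hgj j1 hj1
    have e2 := hgj j2 hj2
    rw [heq] at e1
    have hpw := pvApos_pairwise cs 0
    rw [← hA, List.pairwise_iff_getElem] at hpw
    rcases lt_trichotomy j1.toNat j2.toNat with hlt | heqn | hgt
    · have hlt2 := hpw j1.toNat j2.toNat (by omega) (by omega) hlt
      rw [List.getElem?_eq_getElem (by omega : j1.toNat < A.length)] at e1
      rw [List.getElem?_eq_getElem (by omega : j2.toNat < A.length)] at e2
      have := (Option.some.inj e1).trans (Option.some.inj e2).symm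
      omega
    · omega
    · have hlt2 := hpw j2.toNat j1.toNat (by omega) (by omega) hgt
      rw [List.getElem?_eq_getElem (by omega : j1.toNat < A.length)] at e1
      rw [List.getElem?_eq_getElem (by omega : j2.toNat < A.length)] at e2
      have := (Option.some.inj e1).trans (Option.some.inj e2).symm
      omega
  -- both sides, positionally
  apply List.ext_getElem?
  intro q
  by_cases hq : q < cs.length
  · rw [pvFold_getElem? cs idxs cs rfl
        (fun i hi => by
          obtain ⟨p, rfl, hp, _, _⟩ := (hmemI i).mp hi
          exact ⟨p, rfl, hp, rfl⟩) hndI q hq,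
      pvA_getElem? cs seed q hq]
    have hcq : cs[q]? = some (cs.getD q ' ') := by
      rw [List.getElem?_eq_getElem hq, List.getD_eq_getElem cs ' ' hq]
    by_cases ha : PySem.Chars.isalpha (cs.getD q ' ') = true
    · by_cases hmod : (seed + (pvCntA (cs.take q) : Int)) % 3 = 1
      · rw [if_pos ((hmemI q).mpr ⟨q, rfl, hq, ha, hmod⟩), hcq]
        simp only [Option.map_some]
        congr 1
        have hcond : (PySem.Int.mod (seed + (pvCntA (cs.take q) : Int)) 3 == 1) = true := by
          rw [beq_iff_eq, PySem.Int.mod_eq_emod_of_pos (by norm_num)]; exact hmod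
        unfold pvMapOne pvMapB
        rcases hsub : PySem.Dict.get? pvUniSubst (PySem.Chars.lowerChar (cs.getD q ' ')) with _ | s <;>
          simp [hsub, hcond, hmod]
      · rw [if_neg (fun hmem => by
          obtain ⟨p, hpq, _, _, hmod'⟩ := (hmemI q).mp hmem
          have : p = q := by omega
          subst this; exact hmod hmod'), hcq]
        congr 1
        have hcond : (PySem.Int.mod (seed + (pvCntA (cs.take q) : Int)) 3 == 1) = false := by
          rw [beq_eq_false_iff_ne, PySem.Int.mod_eq_emod_of_pos (by norm_num)]
          exact fun h => hmod h
        unfold pvMapB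
        rcases hsub : PySem.Dict.get? pvUniSubst (PySem.Chars.lowerChar (cs.getD q ' ')) with _ | s <;>
          simp [hsub, hcond, hmod]
    · rw [if_neg (fun hmem => by
        obtain ⟨p, hpq, _, ha', _⟩ := (hmemI q).mp hmem
        have : p = q := by omega
        subst this; exact ha ha'), hcq]
      congr 1
      unfold pvMapB
      rcases hsub : PySem.Dict.get? pvUniSubst (PySem.Chars.lowerChar (cs.getD q ' ')) with _ | s
      · simp [hsub]
      · exact absurd (pvSub_some_isalpha _ _ hsub) ha
  · rw [List.getElem?_eq_none, List.getElem?_eq_none]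
    · rw [List.length_map, List.length_zip, pvCounts_length]; omega
    · rw [pvFold_length]; omega

-- ===== VERDICT (by name: the statement is the Claim_ definition above) =====
theorem unicode_encode_py_spec : Claim_equal_unicode_encode_py := by
  intro text seed _
  unfold Spec_unicode_encode_py unicode_encode_py unicode_encode_py_alt
  simp only []
  rw [pvLists_eq]
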